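-- pv_equiv track=rewrite | github.com/the-omega-institute/automath | theory/2026_golden_ratio_driven_scan_projection_generation_recursive_emergence/scripts/exp_sync_kernel_weighted_chebyshev_dwork_chain.py | _chebyshev_C_list
-- ===== SOURCE A (Python) =====
-- from typing import Dict, List
--
-- Poly = List[int]  # coefficients low->high
--
-- def _poly_trim(a: Poly) -> Poly:
--     i = len(a) - 1
--     while i > 0 and a[i] == 0:
--         i -= 1
--     return a[: i + 1]
--
-- def _chebyshev_C_list(k_max: int) -> List[Poly]:
--     """Return C_k(t) = u^k + u^{-k} as polynomials in t=u+u^{-1}, for k<=k_max."""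
--     if k_max < 0:
--         raise ValueError("k_max must be >= 0")
--     C: List[Poly] = []
--     C.append([2])  # C_0(t)=2
--     if k_max == 0:
--         return C
--     C.append([0, 1])  # C_1(t)=t
--     for k in range(2, k_max + 1):
--         # C_k = t*C_{k-1} - C_{k-2}
--         tc1 = [0] + C[k - 1]
--         out = tc1[:]  # copy
--         c2 = C[k - 2]
--         if len(c2) > len(out):
--             out.extend([0] * (len(c2) - len(out)))
--         for i, ci in enumerate(c2):
--             out[i] -= ci
--         C.append(_poly_trim(out))
--     return C
-- ===== SOURCE B (Python) =====
-- def _chebyshev_C_list(k_max):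
--     """Return C_k(t) = u^k + u^{-k} as polynomials in t=u+u^{-1}, for k<=k_max."""
--     if k_max < 0:
--         raise ValueError("k_max must be >= 0")
--     # each C_k is built directly from the closed (Dickson) form
--     #   coeff at index k-2j = (-1)^j * (k/(k-j)) * binom(k-j, j),
--     # computed by the exact ratio update c_{j+1} = -c_j*(k-2j)(k-2j-1)//((j+1)(k-j-1));
--     # no polynomial recurrence, padding or trimming.
--     res = [[2]]
--     for k in range(1, k_max + 1):
--         poly = [0] * (k + 1)
--         c = 1
--         poly[k] = 1
--         for j in range(k // 2):
--             c = -c * (k - 2 * j) * (k - 2 * j - 1) // ((j + 1) * (k - j - 1))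
--             poly[k - 2 * j - 2] = c
--         res.append(poly)
--     return res
-- ===== Notes on version B (the rewrite author's own statement) =====
-- stated objective: alternative
-- what changed: B computes each polynomial C_k independently from the closed-form Dickson coefficients (k/(k-j))*binom(k-j,j) with alternating signs, generated by an exact multiplicative ratio update across j, instead of A's three-term polynomial recurrence C_k = t*C_{k-1} - C_{k-2} with list padding and trimming.
import Mathlib
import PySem

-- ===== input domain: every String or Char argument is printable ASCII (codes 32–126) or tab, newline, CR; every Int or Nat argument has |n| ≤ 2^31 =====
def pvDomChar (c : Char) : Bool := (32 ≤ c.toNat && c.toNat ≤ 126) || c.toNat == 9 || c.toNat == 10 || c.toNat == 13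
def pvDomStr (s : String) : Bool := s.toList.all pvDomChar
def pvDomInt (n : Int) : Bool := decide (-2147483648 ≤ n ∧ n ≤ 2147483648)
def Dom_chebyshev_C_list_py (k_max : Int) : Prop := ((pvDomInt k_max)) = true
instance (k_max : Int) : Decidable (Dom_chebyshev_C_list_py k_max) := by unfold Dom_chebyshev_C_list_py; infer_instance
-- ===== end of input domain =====

-- B replaces the three-term recurrence by independent closed-form (Dickson) coefficients per k;
-- equivalence of the RETURN values is proved on Pre_ (k_max ≥ 0; the Python raises ValueError otherwise).

-- ===== PORT A =====
-- while loop of _poly_trim: i counts down while a[i] == 0 and i > 0; returns the final i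
def pvTrimAux (a : List Int) : Nat → Nat
  | 0 => 0
  | i+1 => if a.getD (i+1) 0 = 0 then pvTrimAux a i else i+1

def pvPolyTrim (a : List Int) : List Int := a.take (pvTrimAux a (a.length - 1) + 1)

-- body of A's `for k in range(2, k_max+1)` loop
def pvStepA (C : List (List Int)) (k : Int) : List (List Int) :=
  let tc1 : List Int := 0 :: PySem.List.pyGetD C (k-1) []
  let out := tc1
  let c2 := PySem.List.pyGetD C (k-2) []
  let out := if c2.length > out.length then out ++ List.replicate (c2.length - out.length) 0 else out
  let out := (PySem.List.enumerate c2).foldl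
    (fun o p => PySem.List.pySetD o p.1 (PySem.List.pyGetD o p.1 0 - p.2)) out
  C ++ [pvPolyTrim out]

def chebyshev_C_list_py (k_max : Int) : List (List Int) :=
  if k_max < 0 then []  -- Python raises ValueError here; excluded by Pre_
  else if k_max = 0 then [[2]]
  else (PySem.List.pyRange 2 (k_max+1) 1).foldl pvStepA [[2], [0, 1]]

-- ===== PORT B =====
-- body of B's `for k in range(1, k_max+1)` loop; the inner loop carries (poly, c) and
-- updates c by the exact ratio step; poly indices are nonnegative here, so .toNat on the
-- replicate length is exact
def pvStepB (res : List (List Int)) (k : Int) : List (List Int) :=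
  let poly : List Int := List.replicate (k+1).toNat 0
  let c : Int := 1
  let poly := PySem.List.pySetD poly k 1
  let s := (PySem.List.pyRange 0 (PySem.Int.floordiv k 2) 1).foldl
    (fun (s : List Int × Int) j =>
      let c := PySem.Int.floordiv (-s.2 * (k - 2*j) * (k - 2*j - 1)) ((j+1) * (k - j - 1))
      (PySem.List.pySetD s.1 (k - 2*j - 2) c, c))
    (poly, c)
  res ++ [s.1]

def chebyshev_C_list_py_alt (k_max : Int) : List (List Int) :=
  if k_max < 0 then []  -- raise ValueError; excluded by Pre_
  else (PySem.List.pyRange 1 (k_max+1) 1).foldl pvStepB [[2]]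

-- ===== PRECONDITION & SPEC =====
-- Pre_ excludes exactly the inputs on which A raises ValueError (k_max < 0)
def Pre_chebyshev_C_list_py (k_max : Int) : Prop := 0 ≤ k_max
instance (k_max : Int) : Decidable (Pre_chebyshev_C_list_py k_max) := by unfold Pre_chebyshev_C_list_py; infer_instance
def pvWitness_chebyshev_C_list_py : Int := (3)

def Spec_chebyshev_C_list_py (k_max : Int) (out : List (List Int)) : Prop := out = chebyshev_C_list_py_alt k_max
instance (k_max : Int) (out : List (List Int)) : Decidable (Spec_chebyshev_C_list_py k_max out) := by unfold Spec_chebyshev_C_list_py; infer_instance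

-- ===== CLAIM (what is proved, stated in full; the proofs are below) =====
def Claim_equal_chebyshev_C_list_py : Prop := ∀ (k_max : Int), Dom_chebyshev_C_list_py k_max → Pre_chebyshev_C_list_py k_max → Spec_chebyshev_C_list_py k_max (chebyshev_C_list_py k_max)

-- ===== LEMMAS AND PROOFS =====

def pvE (k j : Nat) : Int :=
  ((k - j).choose j : Int) + (if j = 0 then 0 else (((k - j) - 1).choose (j - 1) : Int))

def pvC (k i : Nat) : Int :=
  if i ≤ k ∧ (k - i) % 2 = 0 then (-1)^((k - i)/2) * pvE k ((k - i)/2) else 0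

def pvPoly (k : Nat) : List Int := if k = 0 then [2] else (List.range (k+1)).map (pvC k)

theorem pvC_self (k : Nat) : pvC k k = 1 := by
  rw [pvC, if_pos ⟨le_refl _, by simp⟩]
  simp [pvE]


theorem pvE_mul (k m : Nat) (h : 2*m ≤ k) :
    ((k - m : Nat) : Int) * pvE k m = (k : Int) * (((k-m).choose m : Nat) : Int) := by
  cases m with
  | zero => simp [pvE]
  | succ t =>
    obtain ⟨b, rfl⟩ : ∃ b, k = 2*t+2+b := ⟨k - (2*t+2), by omega⟩
    have e1 : 2*t+2+b - (t+1) = t+1+b := by omega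
    have e2 : t+1+b - 1 = t+b := by omega
    have e3 : t+1-1 = t := by omega
    rw [pvE, e1, e2, e3, if_neg (by omega)]
    have h1 := Nat.add_one_mul_choose_eq (t+b) t
    rw [show t+b+1 = t+1+b from by omega] at h1
    have h1' := congrArg (Nat.cast : Nat → Int) h1
    push_cast at h1' ⊢
    linear_combination h1'

theorem pvChoose_step (k m : Nat) (h : 2*(m+1) ≤ k) :
    (((k-m).choose m : Nat) : Int) * (((k:Int)-2*m-1) * ((k:Int)-2*m)) =
      ((k - m : Nat) : Int) * (((m:Int)+1) * (((k-m-1).choose (m+1) : Nat) : Int)) := by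
  obtain ⟨a, rfl⟩ : ∃ a, k = 2*m+2+a := ⟨k - (2*m+2), by omega⟩
  have e1 : 2*m+2+a - m = m+2+a := by omega
  have e2 : 2*m+2+a - m - 1 = m+1+a := by omega
  rw [e2, e1]
  have f1 : (m+2+a).choose (a+2) = (m+2+a).choose m := by
    have := Nat.choose_symm (n := m+2+a) (k := m) (by omega)
    rwa [show m+2+a - m = a+2 from by omega] at this
  have f2 := Nat.add_one_mul_choose_eq (m+1+a) (a+1)
  rw [show m+1+a+1 = m+2+a from by omega, show a+1+1 = a+2 from by omega] at f2
  have f3 : (m+1+a).choose m = (m+1+a).choose (a+1) := by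
    have := Nat.choose_symm (n := m+1+a) (k := a+1) (by omega)
    rwa [show m+1+a - (a+1) = m from by omega] at this
  have f4 := Nat.choose_succ_right_eq (m+1+a) m
  rw [show m+1+a - m = a+1 from by omega] at f4
  have f1' := congrArg (Nat.cast : Nat → Int) f1
  have f2' := congrArg (Nat.cast : Nat → Int) f2
  have f3' := congrArg (Nat.cast : Nat → Int) f3
  have f4' := congrArg (Nat.cast : Nat → Int) f4
  push_cast at f1' f2' f3' f4' ⊢
  linear_combination (-((a:Int)+1)*((a:Int)+2))*f1' - (((a:Int)+1))*f2' -
    (((m:Int)+2+(a:Int)))*((a:Int)+1)*f3' - (((m:Int)+2+(a:Int)))*f4'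

theorem pvE_ratio (k m : Nat) (h : 2*(m+1) ≤ k) :
    pvE k m * (((k:Int)-2*m) * ((k:Int)-2*m-1))
      = pvE k (m+1) * (((m:Int)+1) * ((k:Int)-(m:Int)-1)) := by
  have fa := pvE_mul k m (by omega)
  have fb := pvE_mul k (m+1) h
  have fc := pvChoose_step k m h
  rw [show k - (m+1) = k - m - 1 from by omega] at fb
  have c1 : ((k - m : Nat) : Int) = (k:Int) - m := by omega
  have c2 : ((k - m - 1 : Nat) : Int) = (k:Int) - m - 1 := by omega
  rw [c1] at fa fc
  rw [c2] at fb
  have h0 : ((k:Int) - m) * ((k:Int) - m - 1) ≠ 0 := by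
    have : (0:Int) < ((k:Int) - m) * ((k:Int) - m - 1) := by
      apply mul_pos <;> omega
    omega
  apply mul_left_cancel₀ h0
  linear_combination (((k:Int)-m-1) * ((k:Int)-2*m) * ((k:Int)-2*m-1)) * fa +
    ((k:Int)*((k:Int)-m-1)) * fc - (((k:Int)-m)*((m:Int)+1)*((k:Int)-m-1)) * fb

theorem pvC_at (K n : Nat) (h2 : 2*n ≤ K) : pvC K (K - 2*n) = (-1)^n * pvE K n := by
  rw [pvC, if_pos (by omega)]
  have hi : K - (K - 2*n) = 2*n := by omega
  rw [hi]
  norm_num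

theorem pvStepVal (K m : Nat) (h : 2*(m+1) ≤ K) :
    PySem.Int.floordiv (-((-1)^m * pvE K m) * ((K:Int) - 2*(m:Int)) * ((K:Int) - 2*(m:Int) - 1))
        (((m:Int)+1) * ((K:Int)-(m:Int)-1))
      = (-1)^(m+1) * pvE K (m+1) := by
  have hD : (0:Int) < ((m:Int)+1) * ((K:Int)-(m:Int)-1) := mul_pos (by omega) (by omega)
  have hnum : -((-1)^m * pvE K m) * ((K:Int) - 2*(m:Int)) * ((K:Int) - 2*(m:Int) - 1)
      = ((-1)^(m+1) * pvE K (m+1)) * (((m:Int)+1) * ((K:Int)-(m:Int)-1)) := by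
    have hr := pvE_ratio K m h
    rw [pow_succ]
    linear_combination (-(-1:Int)^m) * hr
  rw [hnum, PySem.Int.floordiv_eq_ediv_of_pos hD, Int.mul_ediv_cancel _ (by omega)]

theorem pvPartial_set (K n : Nat) (h2 : 2*n ≤ K) :
    ((List.range (K+1)).map (fun i => if (K - i) % 2 = 0 ∧ (K - i)/2 < n then pvC K i else 0)).set
        (K - 2*n) (pvC K (K - 2*n))
      = (List.range (K+1)).map (fun i => if (K - i) % 2 = 0 ∧ (K - i)/2 < n+1 then pvC K i else 0) := by
  apply List.ext_getElem
  · simp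
  · intro i h1 h2'
    rw [List.getElem_set]
    simp only [List.getElem_map, List.getElem_range]
    have hiK : i < K + 1 := by simpa using h1
    by_cases hie : K - 2*n = i
    · subst hie
      rw [if_pos rfl, if_pos (by omega)]
    · rw [if_neg hie]
      by_cases hc : (K - i) % 2 = 0 ∧ (K - i)/2 < n
      · rw [if_pos hc, if_pos ⟨hc.1, by omega⟩]
      · rw [if_neg hc, if_neg (by omega)]

theorem pvInit (K : Nat) : (List.replicate (K+1) (0:Int)).set K 1
    = (List.range (K+1)).map (fun i => if (K - i) % 2 = 0 ∧ (K - i)/2 < 1 then pvC K i else 0) := by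
  apply List.ext_getElem
  · simp
  · intro i h1 h2
    rw [List.getElem_set]
    simp only [List.getElem_map, List.getElem_range, List.getElem_replicate]
    have hiK : i < K + 1 := by simpa using h1
    by_cases hie : K = i
    · subst hie
      rw [if_pos rfl, if_pos (by omega), pvC_self]
    · rw [if_neg hie, if_neg (by omega)]

theorem pvInnerB (K : Nat) : ∀ m, m ≤ K/2 →
    (PySem.List.pyRange 0 (m:Int) 1).foldl
      (fun (s : List Int × Int) j =>
        let c := PySem.Int.floordiv (-s.2 * ((K:Int) - 2*j) * ((K:Int) - 2*j - 1))
          ((j+1) * ((K:Int) - j - 1))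
        (PySem.List.pySetD s.1 ((K:Int) - 2*j - 2) c, c))
      (PySem.List.pySetD (List.replicate ((K:Int)+1).toNat 0) (K:Int) 1, 1)
    = ((List.range (K+1)).map (fun i => if (K - i) % 2 = 0 ∧ (K - i)/2 < m+1 then pvC K i else 0),
       (-1)^m * pvE K m) := by
  intro m
  induction m with
  | zero =>
    intro _
    rw [Nat.cast_zero, PySem.List.pyRange_one_eq_nil (le_refl (0:Int)), List.foldl_nil,
      show ((K:Int)+1).toNat = K+1 from by omega, PySem.List.pySetD_natCast, pvInit]
    simp [pvE]
  | succ m ih =>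
    intro hm
    rw [show (((m+1):Nat):Int) = (m:Int)+1 from by push_cast; ring,
      PySem.List.pyRange_one_succ_right (by omega), List.foldl_append, ih (by omega),
      List.foldl_cons, List.foldl_nil]
    simp only
    rw [pvStepVal K m (by omega)]
    have h0 : (0:Int) ≤ (K:Int) - 2*(m:Int) - 2 := by omega
    rw [PySem.List.pySetD_of_nonneg _ _ h0,
      show ((K:Int) - 2*(m:Int) - 2).toNat = K - 2*(m+1) from by omega]
    apply Prod.ext
    · rw [← pvC_at K (m+1) (by omega)]
      exact pvPartial_set K (m+1) (by omega)
    · rfl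

theorem pvMapFull (K : Nat) :
    (List.range (K+1)).map (fun i => if (K - i) % 2 = 0 ∧ (K - i)/2 < K/2+1 then pvC K i else 0)
      = (List.range (K+1)).map (pvC K) := by
  apply List.ext_getElem
  · simp
  · intro i h1 h2
    simp only [List.getElem_map, List.getElem_range]
    have hiK : i < K + 1 := by simpa using h1
    by_cases hp : (K - i) % 2 = 0
    · rw [if_pos ⟨hp, by omega⟩]
    · rw [if_neg (by tauto), pvC, if_neg (by tauto)]

theorem pvStepB_eq (K : Nat) (hK : 1 ≤ K) (res : List (List Int)) :
    pvStepB res ((K : Int)) = res ++ [pvPoly K] := by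
  have hfd : PySem.Int.floordiv (K:Int) 2 = ((K/2 : Nat):Int) := by
    exact_mod_cast PySem.Int.floordiv_natCast K 2
  simp only [pvStepB, hfd]
  rw [pvInnerB K (K/2) (le_refl _)]
  simp only
  rw [pvMapFull, pvPoly, if_neg (by omega)]

theorem pvE_rec (k j : Nat) (hj : 1 ≤ j) (h : 2*j+1 ≤ k) :
    pvE k j = pvE (k-1) j + pvE (k-2) (j-1) := by
  obtain ⟨l, rfl⟩ : ∃ l, j = l + 1 := ⟨j - 1, by omega⟩
  obtain ⟨m, hm⟩ : ∃ m, k - (l+1) = m + 2 := ⟨k - (l+1) - 2, by omega⟩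
  have e1 : k - (l+1) = m + 2 := hm
  have e1' : k - (l+1) - 1 = m + 1 := by omega
  have e2 : (k-1) - (l+1) = m + 1 := by omega
  have e2' : (k-1) - (l+1) - 1 = m := by omega
  have e3 : (k-2) - ((l+1)-1) = m + 1 := by omega
  have e3' : (k-2) - ((l+1)-1) - 1 = m := by omega
  have e4 : (l+1) - 1 = l := by omega
  rw [pvE, pvE, pvE, e1', e2', e3', e1, e2, e3, e4]
  rw [if_neg (by omega), if_neg (by omega)]
  cases l with
  | zero =>
    simp [Nat.choose_one_right]
    ring
  | succ t =>
    rw [if_neg (by omega)]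
    have p1 : (m + 2).choose (t + 1 + 1) = (m + 1).choose (t + 1) + (m + 1).choose (t + 1 + 1) :=
      Nat.choose_succ_succ (m+1) (t+1)
    have p2 : (m + 1).choose (t + 1) = m.choose t + m.choose (t + 1) := Nat.choose_succ_succ m t
    have e6 : t + 1 - 1 = t := by omega
    rw [e6, p1, p2]
    push_cast
    ring

theorem pvPoly_length (m : Nat) : (pvPoly m).length = m + 1 := by
  rw [pvPoly]
  split <;> simp_all

theorem pvPoly_getD (m i : Nat) (hm : 1 ≤ m) : (pvPoly m).getD i 0 = pvC m i := by
  rw [pvPoly, if_neg (by omega)]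
  by_cases hi : i < m+1
  · rw [List.getD_eq_getElem _ _ (by simpa using hi)]
    simp
  · rw [List.getD_eq_default _ _ (by simpa using hi)]
    rw [pvC, if_neg (by omega)]

-- the pointwise three-term recurrence: coefficient i of C_k from C_{k-1} (shifted) and C_{k-2}
theorem pvC_rec (k i : Nat) (hk : 2 ≤ k) (hik : i < k+1) :
    (0 :: pvPoly (k-1)).getD i 0 - (pvPoly (k-2)).getD i 0 = pvC k i := by
  by_cases hk2 : k = 2
  · subst hk2
    interval_cases i <;> decide
  · have hk3 : 3 ≤ k := by omega
    cases i with
    | zero =>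
      rw [List.getD_cons_zero, pvPoly_getD _ _ (by omega)]
      by_cases hpar : k % 2 = 0
      · have hj2 : 2 ≤ k/2 := by omega
        have ha : k - 0 = k := by omega
        have hb : (k-2) - 0 = k - 2 := by omega
        rw [pvC, pvC, if_pos (by omega), if_pos (by omega), ha, hb]
        have hc : (k-2)/2 = k/2 - 1 := by omega
        rw [hc]
        have hv1 : pvE k (k/2) = 2 := by
          rw [pvE, if_neg (by omega)]
          have : k - k/2 = k/2 := by omega
          rw [this]
          have : k/2 - 1 = k/2 - 1 := rfl
          simp [Nat.choose_self]
        have hv2 : pvE (k-2) (k/2 - 1) = 2 := by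
          rw [pvE, if_neg (by omega)]
          have d1 : (k-2) - (k/2 - 1) = k/2 - 1 := by omega
          rw [d1]
          simp [Nat.choose_self]
        rw [hv1, hv2]
        have hp : (-1:Int)^(k/2) = -(-1:Int)^(k/2 - 1) := by
          conv_lhs => rw [show k/2 = (k/2 - 1) + 1 from by omega]
          rw [pow_succ]
          ring
        rw [hp]
        ring
      · rw [pvC, pvC, if_neg (by omega), if_neg (by omega)]
        ring
    | succ t =>
      rw [List.getD_cons_succ, pvPoly_getD _ _ (by omega), pvPoly_getD _ _ (by omega)]
      by_cases hpar : (k - (t+1)) % 2 = 0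
      · by_cases hjk : t + 1 = k
        · obtain rfl : t = k - 1 := by omega
          rw [show k - 1 + 1 = k from by omega, pvC_self, pvC_self, pvC, if_neg (by omega)]
          ring
        · -- interior even case: j ≥ 1
          have hj1 : 1 ≤ (k - (t+1))/2 := by omega
          set j := (k - (t+1))/2 with hjdef
          have h2j : k - (t+1) = 2*j := by omega
          have c1 : (k-1) - t = 2*j := by omega
          have c2 : (k-2) - (t+1) = 2*(j-1) := by omega
          rw [pvC, pvC, pvC, if_pos (by omega), if_pos (by omega), if_pos (by omega)]
          rw [h2j, c1, c2]
          have d1 : 2*j % 2 = 0 := by omega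
          have d2 : 2*j/2 = j := by omega
          have d3 : 2*(j-1)/2 = j - 1 := by omega
          rw [d2, d3]
          have hrec : pvE k j = pvE (k-1) j + pvE (k-2) (j-1) := pvE_rec k j hj1 (by omega)
          have hp : (-1:Int)^j = -(-1:Int)^(j-1) := by
            conv_lhs => rw [show j = (j - 1) + 1 from by omega]
            rw [pow_succ]
            ring
          rw [hrec, hp]
          ring
      · -- odd case: everything is 0
        have z1 : pvC (k-1) t = 0 := by
          rw [pvC, if_neg (by omega)]
        have z2 : pvC (k-2) (t+1) = 0 := by
          rw [pvC, if_neg (by omega)]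
        have z3 : pvC k (t+1) = 0 := by
          rw [pvC, if_neg (by omega)]
        rw [z1, z2, z3]
        ring

theorem pvMapGetD (l : List Int) : (List.range l.length).map (fun i => l.getD i 0) = l := by
  apply List.ext_getElem
  · simp
  · intro i h1 h2
    simp only [List.getElem_map, List.getElem_range]
    rw [List.getD_eq_getElem _ _ (by simpa using h2)]

-- running A's `for i, ci in enumerate(c2): out[i] -= ci` from start index s
theorem pvSubFold (c2 : List Int) : ∀ (s : Nat) (out : List Int), s + c2.length ≤ out.length →
    (PySem.List.enumerate c2 (s:Int)).foldl
      (fun o p => PySem.List.pySetD o p.1 (PySem.List.pyGetD o p.1 0 - p.2)) out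
    = (List.range out.length).map (fun i => out.getD i 0 - (if s ≤ i then c2.getD (i - s) 0 else 0)) := by
  induction c2 with
  | nil =>
    intro s out h
    rw [PySem.List.enumerate_nil]
    simp only [List.foldl_nil, List.getD_nil]
    have : (List.range out.length).map (fun i => out.getD i 0 - (if s ≤ i then (0:Int) else 0)) =
        (List.range out.length).map (fun i => out.getD i 0) := by
      apply List.map_congr_left
      intro i _
      split <;> ring
    rw [this, pvMapGetD]
  | cons c rest ih =>
    intro s out h
    rw [PySem.List.enumerate_cons, List.foldl_cons]
    have hv : PySem.List.pyGetD out (s:Int) 0 = out.getD s 0 := PySem.List.pyGetD_natCast out s 0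
    rw [PySem.List.pySetD_natCast, hv]
    have hcast : (s:Int)+1 = ((s+1 : Nat):Int) := by push_cast; ring
    rw [hcast]
    have hlen : (s+1) + rest.length ≤ (out.set s (out.getD s 0 - c)).length := by
      simp at h ⊢; omega
    rw [ih (s+1) _ hlen]
    apply List.ext_getElem
    · simp
    · intro i h1 h2
      have hi : i < out.length := by simpa using h1
      simp only [List.getElem_map, List.getElem_range]
      have hs : s < out.length := by simp at h; omega
      have hset : (out.set s (out.getD s 0 - c)).getD i 0 =
          if s = i then out.getD s 0 - c else out.getD i 0 := by
        rw [List.getD_eq_getElem _ _ (by simpa using hi), List.getElem_set]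
        split
        · rfl
        · rw [List.getD_eq_getElem _ _ hi]
      rw [hset]
      by_cases his : s = i
      · subst his
        rw [if_pos rfl, if_neg (show ¬ (s+1 ≤ s) by omega), if_pos (le_refl s),
          Nat.sub_self, List.getD_cons_zero]
        ring
      · rw [if_neg his]
        by_cases hlt : s ≤ i
        · have hsi : s + 1 ≤ i := by omega
          rw [if_pos hsi, if_pos hlt]
          rw [show i - s = (i - (s+1)) + 1 from by omega, List.getD_cons_succ]
        · rw [if_neg (by omega), if_neg hlt]

theorem pvSubFold0 (c2 out : List Int) (h : c2.length ≤ out.length) :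
    (PySem.List.enumerate c2).foldl
      (fun o p => PySem.List.pySetD o p.1 (PySem.List.pyGetD o p.1 0 - p.2)) out
    = (List.range out.length).map (fun i => out.getD i 0 - c2.getD i 0) := by
  have h0 : ((0:Nat):Int) = (0:Int) := by simp
  have := pvSubFold c2 0 out (by omega)
  rw [h0] at this
  rw [this]
  apply List.map_congr_left
  intro i _
  rw [if_pos (Nat.zero_le i), Nat.sub_zero]


theorem pvTrim_poly (k : Nat) : pvPolyTrim (pvPoly k) = pvPoly k := by
  cases k with
  | zero => decide
  | succ t =>
    have hlen : (pvPoly (t+1)).length = t+2 := pvPoly_length _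
    rw [pvPolyTrim, hlen, show t+2-1 = t+1 from by omega]
    have hget : (pvPoly (t+1)).getD (t+1) 0 = pvC (t+1) (t+1) := pvPoly_getD _ _ (by omega)
    rw [pvTrimAux, hget, pvC_self, if_neg (by norm_num)]
    exact List.take_of_length_le (by omega)

theorem pvStepA_eq (k : Nat) (h2a : 2 ≤ k) :
    pvStepA ((List.range k).map pvPoly) ((k : Int)) = (List.range (k+1)).map pvPoly := by
  have hg1 : PySem.List.pyGetD ((List.range k).map pvPoly) ((k:Int)-1) [] = pvPoly (k-1) := by
    rw [show (k:Int)-1 = ((k-1:Nat):Int) from by omega, PySem.List.pyGetD_natCast]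
    rw [List.getD_eq_getElem _ _ (by simp; omega)]
    simp
  have hg2 : PySem.List.pyGetD ((List.range k).map pvPoly) ((k:Int)-2) [] = pvPoly (k-2) := by
    rw [show (k:Int)-2 = ((k-2:Nat):Int) from by omega, PySem.List.pyGetD_natCast]
    rw [List.getD_eq_getElem _ _ (by simp; omega)]
    simp
  simp only [pvStepA]
  rw [hg1, hg2]
  have hl1 : (0 :: pvPoly (k-1)).length = k+1 := by
    simp [pvPoly_length]; omega
  have hl2 : (pvPoly (k-2)).length = k-1 := by
    rw [pvPoly_length]; omega
  rw [if_neg (by rw [hl1, hl2]; omega)]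
  rw [pvSubFold0 _ _ (by rw [hl1, hl2]; omega), hl1]
  have hmap : (List.range (k+1)).map (fun i => (0 :: pvPoly (k-1)).getD i 0 - (pvPoly (k-2)).getD i 0)
      = (List.range (k+1)).map (pvC k) := by
    apply List.ext_getElem
    · simp
    · intro i h1 h2
      simp only [List.getElem_map, List.getElem_range]
      exact pvC_rec k i h2a (by simpa using h2)
  rw [hmap, show (List.range (k+1)).map (pvC k) = pvPoly k from (by rw [pvPoly, if_neg (by omega)])]
  rw [pvTrim_poly, List.range_succ, List.map_append]
  simp

theorem pvFoldA (K : Nat) (hK : 1 ≤ K) :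
    (PySem.List.pyRange 2 ((K:Int)+1) 1).foldl pvStepA [[2],[0,1]] = (List.range (K+1)).map pvPoly := by
  induction K, hK using Nat.le_induction with
  | base =>
    rw [show ((1:Nat):Int)+1 = 2 from by norm_num, PySem.List.pyRange_one_eq_nil (le_refl 2)]
    rw [List.foldl_nil]
    decide
  | succ K hK ih =>
    rw [show (((K+1):Nat):Int)+1 = ((K:Int)+1)+1 from by push_cast; ring]
    rw [PySem.List.pyRange_one_succ_right (by omega), List.foldl_append, ih, List.foldl_cons,
      List.foldl_nil]
    rw [show (K:Int)+1 = (((K+1):Nat):Int) from by push_cast; ring]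
    exact pvStepA_eq (K+1) (by omega)

theorem pvFoldB (K : Nat) :
    (PySem.List.pyRange 1 ((K:Int)+1) 1).foldl pvStepB [[2]] = (List.range (K+1)).map pvPoly := by
  induction K with
  | zero =>
    rw [show ((0:Nat):Int)+1 = 1 from by norm_num, PySem.List.pyRange_one_eq_nil (le_refl 1)]
    rw [List.foldl_nil]
    decide
  | succ K ih =>
    rw [show (((K+1):Nat):Int)+1 = ((K:Int)+1)+1 from by push_cast; ring]
    rw [PySem.List.pyRange_one_succ_right (by omega), List.foldl_append, ih, List.foldl_cons,
      List.foldl_nil]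
    rw [show (K:Int)+1 = (((K+1):Nat):Int) from by push_cast; ring]
    rw [pvStepB_eq (K+1) (by omega)]
    conv_rhs => rw [List.range_succ]
    rw [List.map_append, List.map_singleton]

-- ===== VERDICT (by name: the statement is the Claim_ definition above) =====
theorem chebyshev_C_list_py_spec : Claim_equal_chebyshev_C_list_py := by
  intro k_max _ hpre
  show chebyshev_C_list_py k_max = chebyshev_C_list_py_alt k_max
  obtain ⟨K, rfl⟩ : ∃ K : Nat, k_max = (K:Int) := ⟨k_max.toNat, by
    have : (0:Int) ≤ k_max := hpre
    omega⟩
  cases K with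
  | zero => decide
  | succ t =>
    rw [chebyshev_C_list_py, chebyshev_C_list_py_alt]
    rw [if_neg (by omega), if_neg (by omega), if_neg (by omega)]
    rw [pvFoldA (t+1) (by omega), pvFoldB (t+1)]
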